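-- pv_equiv track=rewrite | github.com/Baba256atma/STATESTUDIO | backend/main.py | _text_tokens
-- ===== SOURCE A (Python) =====
-- def _text_tokens(s: str) -> set[str]:
--     if not s or not isinstance(s, str):
--         return set()
--     out = []
--     cur = []
--     for ch in s.lower():
--         if ch.isalnum() or ch in {"_", "-"}:
--             cur.append(ch)
--         else:
--             if cur:
--                 out.append("".join(cur))
--                 cur = []
--     if cur:
--         out.append("".join(cur))
--     return set(out)
-- ===== SOURCE B (Python) =====
-- def _text_tokens(s: str) -> set[str]:
--     if not s or not isinstance(s, str):
--         return set()
--     return set(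
--         "".join(ch if (ch.isalnum() or ch in "_-") else " " for ch in s.lower()).split()
--     )
-- ===== Notes on version B (the rewrite author's own statement) =====
-- stated objective: simpler
-- what changed: Replaces the manual cur/out accumulate-and-flush loop with a transform-then-split decomposition: map every non-token character to a space and split on whitespace.
import Mathlib
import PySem

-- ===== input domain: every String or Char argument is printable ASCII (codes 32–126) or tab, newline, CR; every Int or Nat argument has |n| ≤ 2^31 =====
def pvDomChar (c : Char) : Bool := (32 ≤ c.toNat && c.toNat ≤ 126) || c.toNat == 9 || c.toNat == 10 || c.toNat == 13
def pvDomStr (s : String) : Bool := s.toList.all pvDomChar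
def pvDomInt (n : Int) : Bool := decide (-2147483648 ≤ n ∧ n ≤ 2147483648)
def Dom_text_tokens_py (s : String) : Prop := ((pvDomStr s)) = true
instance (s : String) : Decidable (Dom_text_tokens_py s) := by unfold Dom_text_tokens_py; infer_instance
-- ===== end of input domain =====

-- B replaces A's manual cur/out accumulate-and-flush loop with a transform-then-split
-- decomposition (map non-token chars to spaces, then split on whitespace); objective: simpler.

-- ===== PORT A =====
-- ch.isalnum() or ch in {"_", "-"}
def pvTokChar (c : Char) : Bool := PySem.Chars.isalnum c || (c == '_' || c == '-')

def text_tokens_py (s : String) : List String :=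
  if s.toList = [] then []
  else
    let p := (PySem.Str.lower s).toList.foldl
      (fun (st : List String × List Char) ch =>
        if pvTokChar ch then (st.1, st.2 ++ [ch])
        else if st.2 ≠ [] then (st.1 ++ [String.ofList st.2], []) else st)
      ([], [])
    let out := if p.2 ≠ [] then p.1 ++ [String.ofList p.2] else p.1
    PySem.Set.ofList out

-- ===== PORT B =====
def text_tokens_py_alt (s : String) : List String :=
  if s.toList = [] then []
  else
    PySem.Set.ofList
      (PySem.Str.split₀
        (String.ofList ((PySem.Str.lower s).toList.map
          (fun ch => if pvTokChar ch then ch else ' '))))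

-- ===== PRECONDITION & SPEC =====
def Spec_text_tokens_py (s : String) (out : List String) : Prop := out = text_tokens_py_alt s
instance (s : String) (out : List String) : Decidable (Spec_text_tokens_py s out) := by unfold Spec_text_tokens_py; infer_instance

-- ===== CLAIM (what is proved, stated in full; the proofs are below) =====
def Claim_equal_text_tokens_py : Prop := ∀ (s : String), Dom_text_tokens_py s → Spec_text_tokens_py s (text_tokens_py s)

-- ===== LEMMAS AND PROOFS =====

-- A token character is never Python-whitespace.
theorem pvTok_not_space (c : Char) (h : pvTokChar c = true) : PySem.Chars.isspace c = false := by
  simp only [pvTokChar, PySem.Chars.isalnum, PySem.Chars.isalpha, PySem.Chars.isupper,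
    PySem.Chars.islower, PySem.Chars.isdigit, PySem.Chars.isspace, Bool.or_eq_true,
    decide_eq_true_eq, Bool.and_eq_true, beq_iff_eq, Char.le_def, Char.toNat,
    Bool.or_eq_false_iff, Bool.and_eq_false_iff, decide_eq_false_iff_not] at h ⊢
  rcases h with ((⟨h1,h2⟩|⟨h1,h2⟩)|⟨h1,h2⟩)|h|h <;>
    first
    | (subst h; decide)
    | (simp only [UInt32.le_iff_toNat_le, show ('0'.val.toNat)=48 from rfl,
        show ('9'.val.toNat)=57 from rfl, show ('A'.val.toNat)=65 from rfl,
        show ('Z'.val.toNat)=90 from rfl, show ('a'.val.toNat)=97 from rfl,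
        show ('z'.val.toNat)=122 from rfl] at h1 h2; omega)

theorem pvSpace_space : PySem.Chars.isspace ' ' = true := by decide

-- split₀.go's accumulator prepends (reversed) to the final result.
theorem pvGo_acc (cs : List Char) (cur : List Char) (acc : List (List Char)) :
    PySem.Chars.split₀.go cs cur acc = acc.reverse ++ PySem.Chars.split₀.go cs cur [] := by
  induction cs generalizing cur acc with
  | nil =>
    by_cases h : cur.isEmpty = true <;> simp [PySem.Chars.split₀.go, h]
  | cons c rest ih =>
    by_cases hs : PySem.Chars.isspace c = true
    · by_cases hc : cur.isEmpty = true
      · simp [PySem.Chars.split₀.go, hs, hc]; exact ih _ _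
      · simp only [PySem.Chars.split₀.go, hs, hc, if_true, if_false, Bool.false_eq_true]
        rw [ih [] (cur.reverse :: acc), ih [] [cur.reverse]]
        simp
    · simp only [PySem.Chars.split₀.go, hs, Bool.false_eq_true, if_false]
      exact ih _ _

-- Main invariant: A's flush-at-end fold over cs, started at (out, cur), equals
-- out ++ the words of cs with non-token chars mapped to spaces, cur prefixed.
theorem pvMain (cs : List Char) (out : List String) (cur : List Char) :
    (let p := cs.foldl
        (fun (st : List String × List Char) ch =>
          if pvTokChar ch then (st.1, st.2 ++ [ch])
          else if st.2 ≠ [] then (st.1 ++ [String.ofList st.2], []) else st)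
        (out, cur);
      if p.2 ≠ [] then p.1 ++ [String.ofList p.2] else p.1)
    = out ++ (PySem.Chars.split₀.go
        (cs.map (fun ch => if pvTokChar ch then ch else ' '))
        cur.reverse []).map String.ofList := by
  induction cs generalizing out cur with
  | nil =>
    by_cases h : cur = [] <;>
      simp [PySem.Chars.split₀.go, h, List.isEmpty_iff]
  | cons c rest ih =>
    by_cases ht : pvTokChar c = true
    · have hs := pvTok_not_space c ht
      simp only [List.foldl_cons, List.map_cons, ht, if_true]
      simp only [PySem.Chars.split₀.go, hs, Bool.false_eq_true, if_false]
      have := ih out (cur ++ [c])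
      simpa using this
    · simp only [List.foldl_cons, List.map_cons, ht, Bool.false_eq_true, if_false]
      simp only [PySem.Chars.split₀.go, pvSpace_space, if_true]
      by_cases hc : cur = []
      · subst hc
        simpa using ih out []
      · simp only [List.isEmpty_iff, List.reverse_eq_nil_iff, hc, if_false, ne_eq,
          not_false_eq_true, if_true, List.reverse_reverse]
        rw [pvGo_acc _ [] [cur]]
        have := ih (out ++ [String.ofList cur]) []
        simpa using this

-- ===== VERDICT (by name: the statement is the Claim_ definition above) =====
theorem text_tokens_py_spec : Claim_equal_text_tokens_py := by
  intro s _
  unfold Spec_text_tokens_py text_tokens_py text_tokens_py_alt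
  by_cases h : s.toList = []
  · simp [h]
  · simp only [h, if_false]
    rw [pvMain ((PySem.Str.lower s).toList) [] []]
    simp [PySem.Str.split₀, PySem.Chars.split₀]
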